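-- pv_equiv track=rewrite | github.com/EvgeniyDorosev/Magma_cipher | main.py | y_shift_transformation
-- ===== SOURCE A (Python) =====
-- def shift_str(x, k_i, size):
--     res = ""
--     amount = k_i.count('1')
--     for i in range(len(x)):
--         res += x[(i - amount) % size]
--     return res
--
-- def y_shift_transformation(x, k, block_size, r):
--     lst_y = []
--     for j in range(len(x)):
--         temp = x[j]
--         for i in range(r):
--             temp = shift_str(temp, k[i], block_size)
--         lst_y.append(temp)
--     return lst_y
-- ===== SOURCE B (Python) =====
-- def y_shift_transformation(x, k, block_size, r):
--     # One pass: the r per-block rotations compose into a single rotation by the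
--     # total number of '1' bits in the first r key strings.
--     if r <= 0 or not x:
--         return list(x)
--     total = sum(ki.count('1') for ki in k[:r])
--     return [''.join(s[(i - total) % block_size] for i in range(len(s))) for s in x]
-- ===== Notes on version B (the rewrite author's own statement) =====
-- stated objective: faster
-- what changed: B replaces the r-fold re-shifting of every block by a single rotation: it sums the '1'-counts of the first r key strings once and builds each output block in one pass as s[(i - total) % block_size].
-- outside the precondition, e.g. on y_shift_transformation(['abc'], ['1', '1'], -2, 2): A returns ['ccc'], B returns ['aca']
import Mathlib
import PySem

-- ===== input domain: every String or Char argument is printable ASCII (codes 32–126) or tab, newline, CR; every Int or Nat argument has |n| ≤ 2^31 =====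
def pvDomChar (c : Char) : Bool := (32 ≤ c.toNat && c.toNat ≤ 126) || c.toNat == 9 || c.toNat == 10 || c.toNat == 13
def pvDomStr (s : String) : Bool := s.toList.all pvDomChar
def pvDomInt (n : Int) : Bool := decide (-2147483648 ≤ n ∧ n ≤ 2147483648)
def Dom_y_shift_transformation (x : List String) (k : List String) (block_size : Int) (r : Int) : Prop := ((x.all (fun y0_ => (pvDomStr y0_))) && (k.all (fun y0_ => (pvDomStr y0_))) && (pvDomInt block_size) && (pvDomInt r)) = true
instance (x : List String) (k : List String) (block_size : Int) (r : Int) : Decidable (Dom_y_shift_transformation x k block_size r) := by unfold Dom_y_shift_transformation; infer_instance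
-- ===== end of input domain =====

-- B replaces A's r-fold re-shifting of every block by one pass: the shift amounts of the
-- first r keys are summed once and each block is rotated a single time (objective: faster).

-- ===== PORT A =====
-- shift_str: res += x[(i - amount) % size]; the `none` branch is Python's
-- IndexError (index out of range) / ZeroDivisionError (size = 0), excluded by Pre_.
def pvShiftStrA (x : List Char) (k_i : List Char) (size : Int) : List Char :=
  let amount : Int := ((PySem.Chars.count k_i ['1'] : Nat) : Int)
  (PySem.List.pyRange 0 (x.length : Int) 1).foldl
    (fun res i =>
      res ++ (match PySem.List.pyGet? x (PySem.Int.mod (i - amount) size) with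
              | some c => [c]
              | none => []))
    []

def y_shift_transformation (x : List String) (k : List String) (block_size : Int) (r : Int) : List String :=
  (PySem.List.pyRange 0 (x.length : Int) 1).foldl
    (fun lst_y j =>
      lst_y ++ [String.ofList ((PySem.List.pyRange 0 r 1).foldl
        (fun temp i => pvShiftStrA temp (PySem.List.pyGetD k i "").toList block_size)
        (PySem.List.pyGetD x j "").toList)])
    []

-- ===== PORT B =====
def y_shift_transformation_alt (x : List String) (k : List String) (block_size : Int) (r : Int) : List String :=
  if r ≤ 0 ∨ x = [] then x
  else
    let total : Int := ((PySem.List.slice k none (some r)).map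
      (fun ki => ((PySem.Chars.count ki.toList ['1'] : Nat) : Int))).sum
    x.map (fun s =>
      String.ofList ((PySem.List.pyRange 0 (s.toList.length : Int) 1).map
        (fun i => PySem.List.pyGetD s.toList (PySem.Int.mod (i - total) block_size) ' ')))

-- ===== PRECONDITION & SPEC =====
-- Pre_ excludes exactly the inputs where A raises (r beyond the key list, block_size = 0,
-- or an index (i-amount)%block_size falling outside a block), and additionally the
-- non-positive block sizes — outside the cipher's natural domain — where A only returns at
-- all via Python's negative-index wraparound, under which the shifts no longer compose.
def Pre_y_shift_transformation (x : List String) (k : List String) (block_size : Int) (r : Int) : Prop :=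
  (x ≠ [] ∧ 0 < r) →
    (r ≤ (k.length : Int) ∧
      ((∃ s ∈ x, s ≠ "") →
        0 < block_size ∧
        ∀ s ∈ x, s = "" ∨ block_size ≤ (s.toList.length : Int) ∨
          ∀ ki ∈ k.take r.toNat,
            PySem.Int.mod ((PySem.Chars.count ki.toList ['1'] : Nat) : Int) block_size = 0))
instance (x : List String) (k : List String) (block_size : Int) (r : Int) : Decidable (Pre_y_shift_transformation x k block_size r) := by unfold Pre_y_shift_transformation; infer_instance

def pvWitness_y_shift_transformation : List String × List String × Int × Int := (["abcd"], ["11"], 4, 1)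

def Spec_y_shift_transformation (x : List String) (k : List String) (block_size : Int) (r : Int) (out : List String) : Prop := out = y_shift_transformation_alt x k block_size r
instance (x : List String) (k : List String) (block_size : Int) (r : Int) (out : List String) : Decidable (Spec_y_shift_transformation x k block_size r out) := by unfold Spec_y_shift_transformation; infer_instance

-- ===== CLAIM (what is proved, stated in full; the proofs are below) =====
def Claim_equal_y_shift_transformation : Prop := ∀ (x : List String) (k : List String) (block_size : Int) (r : Int), Dom_y_shift_transformation x k block_size r → Pre_y_shift_transformation x k block_size r → Spec_y_shift_transformation x k block_size r (y_shift_transformation x k block_size r)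

-- ===== LEMMAS AND PROOFS =====

-- the count of '1' in a key, as B sums it
def pvCnt (ki : List Char) : Int := ((PySem.Chars.count ki ['1'] : Nat) : Int)

-- the single rotation B performs: element i is s[(i - t) % bs]
def pvS (bs t : Int) (s : List Char) : List Char :=
  (PySem.List.pyRange 0 (s.length : Int) 1).map
    (fun i => PySem.List.pyGetD s (PySem.Int.mod (i - t) bs) ' ')

lemma pv_len_pvS (bs t : Int) (s : List Char) : (pvS bs t s).length = s.length := by
  simp [pvS, PySem.List.length_pyRange_one]

lemma pv_pyGet?_eq_some (xs : List Char) (n : Int) (d : Char) (h0 : 0 ≤ n) (h : n < (xs.length : Int)) :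
    PySem.List.pyGet? xs n = some (PySem.List.pyGetD xs n d) := by
  simp only [PySem.List.pyGet?, PySem.List.pyGetD, PySem.List.pyIdx?, if_pos h0, if_pos h]
  have : n.toNat < xs.length := by omega
  simp [Option.bind, List.getElem?_eq_getElem this]

lemma pv_modmod (b x a : Int) (hb : 0 < b) :
    PySem.Int.mod (PySem.Int.mod x b - a) b = PySem.Int.mod (x - a) b := by
  rw [PySem.Int.mod_eq_emod_of_pos hb, PySem.Int.mod_eq_emod_of_pos hb,
    PySem.Int.mod_eq_emod_of_pos hb, Int.sub_emod, Int.emod_emod_of_dvd _ dvd_rfl,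
    ← Int.sub_emod]

lemma pv_shiftA_eq (bs : Int) (s ki : List Char) (hb : 0 < bs) (hle : bs ≤ (s.length : Int)) :
    pvShiftStrA s ki bs = pvS bs (pvCnt ki) s := by
  unfold pvShiftStrA pvS pvCnt
  rw [PySem.List.foldl_congr_mem _ _
      (fun res i => res ++ [PySem.List.pyGetD s (PySem.Int.mod (i - ((PySem.Chars.count ki ['1'] : Nat) : Int)) bs) ' ']) _
      (by
        intro acc i _
        congr 1
        rw [pv_pyGet?_eq_some s _ ' ' (PySem.Int.mod_nonneg _ hb)
          (lt_of_lt_of_le (PySem.Int.mod_lt _ hb) hle)])]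
  rw [PySem.List.foldl_append_singleton_eq_map]
  simp

lemma pv_comp (bs : Int) (s : List Char) (hb : 0 < bs) (hle : bs ≤ (s.length : Int)) (t a : Int) :
    pvS bs a (pvS bs t s) = pvS bs (t + a) s := by
  have hl : ((pvS bs t s).length : Int) = (s.length : Int) := by rw [pv_len_pvS]
  conv_lhs => rw [pvS, hl]
  conv_rhs => rw [pvS]
  apply List.map_congr_left
  intro i hi
  have hmem := (PySem.List.mem_pyRange_one).mp hi
  conv_lhs => rw [pvS]
  rw [PySem.List.pyGetD_map_pyRange_of_nonneg _ (s.length : Int) _ ' '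
    (PySem.Int.mod_nonneg _ hb) (lt_of_lt_of_le (PySem.Int.mod_lt _ hb) hle)]
  rw [pv_modmod _ _ _ hb]
  congr 2
  ring

lemma pv_foldl_shift (bs : Int) (s : List Char) (hb : 0 < bs) (hle : bs ≤ (s.length : Int))
    (ks : List (List Char)) : ∀ (t : Int),
    ks.foldl (fun temp ki => pvShiftStrA temp ki bs) (pvS bs t s)
      = pvS bs (t + (ks.map pvCnt).sum) s := by
  induction ks with
  | nil => intro t; simp
  | cons ki ks ih =>
    intro t
    simp only [List.foldl_cons, List.map_cons, List.sum_cons]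
    rw [pv_shiftA_eq bs (pvS bs t s) ki hb (by rw [pv_len_pvS]; exact hle),
      pv_comp bs s hb hle, ih]
    congr 1
    ring

lemma pv_iter_eq (bs : Int) (s : List Char) (hb : 0 < bs) (hle : bs ≤ (s.length : Int))
    (ki : List Char) (ks : List (List Char)) :
    (ki :: ks).foldl (fun temp ki => pvShiftStrA temp ki bs) s
      = pvS bs (((ki :: ks).map pvCnt).sum) s := by
  simp only [List.foldl_cons, List.map_cons, List.sum_cons]
  rw [pv_shiftA_eq bs s ki hb hle, pv_foldl_shift bs s hb hle ks]

lemma pv_shiftA_nil (ki : List Char) (bs : Int) : pvShiftStrA [] ki bs = [] := by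
  simp [pvShiftStrA, PySem.List.pyRange_one_eq_nil]

lemma pv_foldl_nil (ks : List (List Char)) (bs : Int) :
    ks.foldl (fun temp ki => pvShiftStrA temp ki bs) [] = [] := by
  induction ks with
  | nil => rfl
  | cons ki ks ih => simp [pv_shiftA_nil, ih]

lemma pv_mod_id (bs i a : Int) (hb : 0 < bs) (h0 : 0 ≤ i) (hi : i < bs)
    (ha : PySem.Int.mod a bs = 0) : PySem.Int.mod (i - a) bs = i := by
  have hdvd : bs ∣ a := (PySem.Int.mod_eq_zero_iff_dvd a bs).mp ha
  rw [PySem.Int.mod_eq_emod_of_pos hb, Int.sub_emod, Int.emod_eq_zero_of_dvd hdvd,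
    sub_zero, Int.emod_emod_of_dvd _ dvd_rfl, Int.emod_eq_of_lt h0 hi]

lemma pv_shiftA_id (bs : Int) (s ki : List Char) (hb : 0 < bs) (hlt : (s.length : Int) ≤ bs)
    (hki : PySem.Int.mod (pvCnt ki) bs = 0) : pvShiftStrA s ki bs = s := by
  simp only [pvCnt] at hki
  unfold pvShiftStrA
  rw [PySem.List.foldl_congr_mem _ _ (fun res i => res ++ [PySem.List.pyGetD s i ' ']) _
      (by
        intro acc i hi
        have hmem := (PySem.List.mem_pyRange_one).mp hi
        congr 1
        rw [pv_mod_id bs i _ hb hmem.1 (lt_of_lt_of_le hmem.2 hlt) hki]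

        rw [pv_pyGet?_eq_some s i ' ' hmem.1 hmem.2])]
  rw [PySem.List.foldl_append_singleton_eq_map]
  simp [PySem.List.map_pyGetD_pyRange_zero']

lemma pv_foldl_id (bs : Int) (s : List Char) (ks : List (List Char)) (hb : 0 < bs)
    (hlt : (s.length : Int) ≤ bs) (hall : ∀ ki ∈ ks, PySem.Int.mod (pvCnt ki) bs = 0) :
    ks.foldl (fun temp ki => pvShiftStrA temp ki bs) s = s := by
  induction ks with
  | nil => rfl
  | cons ki ks ih =>
    simp only [List.foldl_cons]
    rw [pv_shiftA_id bs s ki hb hlt (hall ki (by simp))]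
    exact ih (fun ki hki => hall ki (by simp [hki]))

lemma pv_pvS_id (bs t : Int) (s : List Char) (hb : 0 < bs) (hlt : (s.length : Int) ≤ bs)
    (ht : PySem.Int.mod t bs = 0) : pvS bs t s = s := by
  unfold pvS
  rw [List.map_congr_left (fun i hi => by
    have hmem := (PySem.List.mem_pyRange_one).mp hi
    rw [pv_mod_id bs i t hb hmem.1 (lt_of_lt_of_le hmem.2 hlt) ht])]
  exact PySem.List.map_pyGetD_pyRange_zero' s ' '

lemma pv_take_foldl {β : Type} (k : List String) (g : β → String → β) : ∀ (n : Nat) (t0 : β),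
    n ≤ k.length →
    (PySem.List.pyRange 0 (n : Int) 1).foldl (fun t i => g t (PySem.List.pyGetD k i "")) t0
      = (k.take n).foldl g t0 := by
  intro n
  induction n with
  | zero => intro t0 _; simp [PySem.List.pyRange_one_eq_nil]
  | succ n ih =>
    intro t0 h
    have hn : n < k.length := by omega
    rw [show ((n + 1 : Nat) : Int) = (n : Int) + 1 by push_cast; ring,
      PySem.List.pyRange_one_succ_right (by positivity), List.foldl_append,
      ih t0 (by omega), List.take_add_one, List.getElem?_eq_getElem hn, List.foldl_append]
    simp [PySem.List.pyGetD_natCast, List.getD_eq_getElem?_getD, List.getElem?_eq_getElem hn]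

-- ===== VERDICT (by name: the statement is the Claim_ definition above) =====
theorem y_shift_transformation_spec : Claim_equal_y_shift_transformation := by
  intro x k bs r _hDom hPre
  unfold Spec_y_shift_transformation
  unfold y_shift_transformation y_shift_transformation_alt
  by_cases hcase : r ≤ 0 ∨ x = []
  · rw [if_pos hcase]
    rcases hcase with hr | hx
    · rw [show (PySem.List.pyRange 0 r 1) = [] from PySem.List.pyRange_one_eq_nil hr]
      simp only [List.foldl_nil]
      rw [show (PySem.List.pyRange 0 (x.length : Int) 1).foldl
            (fun lst_y j => lst_y ++ [String.ofList (PySem.List.pyGetD x j "").toList]) []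
          = x.foldl (fun lst_y s => lst_y ++ [String.ofList s.toList]) [] from
          PySem.List.foldl_pyRange_zero_pyGetD' x ""
            (fun lst_y s => lst_y ++ [String.ofList s.toList]) []]
      rw [PySem.List.foldl_append_singleton_eq_map]
      simp
    · subst hx; simp [PySem.List.pyRange_one_eq_nil]
  · rw [if_neg hcase]
    rcases not_or.mp hcase with ⟨hr0, hx⟩
    have hr : 0 < r := lt_of_not_ge hr0
    obtain ⟨hrk, hstr⟩ := hPre ⟨hx, hr⟩
    -- outer loop → map over x
    rw [show (PySem.List.pyRange 0 (x.length : Int) 1).foldl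
          (fun lst_y j => lst_y ++ [String.ofList ((PySem.List.pyRange 0 r 1).foldl
            (fun temp i => pvShiftStrA temp (PySem.List.pyGetD k i "").toList bs)
            (PySem.List.pyGetD x j "").toList)]) []
        = x.foldl (fun lst_y s => lst_y ++ [String.ofList ((PySem.List.pyRange 0 r 1).foldl
            (fun temp i => pvShiftStrA temp (PySem.List.pyGetD k i "").toList bs)
            s.toList)]) [] from PySem.List.foldl_pyRange_zero_pyGetD' x ""
          (fun lst_y s => lst_y ++ [String.ofList ((PySem.List.pyRange 0 r 1).foldl
            (fun temp i => pvShiftStrA temp (PySem.List.pyGetD k i "").toList bs)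
            s.toList)]) []]
    rw [PySem.List.foldl_append_singleton_eq_map]
    simp only [List.nil_append]
    -- B's total as a sum over the taken keys
    simp only [PySem.List.slice_to k hr.le]
    have htot : ((k.take r.toNat).map
        (fun ki => ((PySem.Chars.count ki.toList ['1'] : Nat) : Int))).sum
        = (((k.take r.toNat).map String.toList).map pvCnt).sum := by
      rw [List.map_map]; rfl
    simp only [htot]
    apply List.map_congr_left
    intro s hs
    dsimp only
    congr 1
    -- A's inner loop → fold over the taken keys
    have hr' : r = (r.toNat : Int) := (Int.toNat_of_nonneg hr.le).symm
    rw [hr', pv_take_foldl k (fun temp ki => pvShiftStrA temp ki.toList bs) r.toNat s.toList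
      (by omega)]
    simp only [Int.toNat_natCast]
    rw [show (k.take r.toNat).foldl (fun temp ki => pvShiftStrA temp ki.toList bs) s.toList
        = ((k.take r.toNat).map String.toList).foldl (fun temp ki => pvShiftStrA temp ki bs) s.toList
        by rw [List.foldl_map]]
    set ks := (k.take r.toNat).map String.toList with hks
    by_cases hs0 : s.toList = []
    · rw [hs0, pv_foldl_nil]
      simp [PySem.List.pyRange_one_eq_nil]
    · have hne : s ≠ "" := by
        intro h; subst h; simp at hs0
      obtain ⟨hb, hdisj⟩ := hstr ⟨s, hs, hne⟩
      by_cases hle : bs ≤ (s.toList.length : Int)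
      · -- composition case: the taken key list is nonempty
        have hkne : ks ≠ [] := by
          simp only [hks, ne_eq, List.map_eq_nil_iff, List.take_eq_nil_iff]
          rw [not_or]
          constructor
          · omega
          · intro h; subst h; simp at hrk; omega
        obtain ⟨ki, ks', hcons⟩ := List.exists_cons_of_ne_nil hkne
        rw [hcons, pv_iter_eq bs s.toList hb hle ki ks', ← hcons]
        rfl
      · -- identity case: every key's count is a multiple of bs
        rcases hdisj s hs with h | h | hall
        · exact absurd h hne
        · exact absurd h hle
        · have hall' : ∀ ki ∈ ks, PySem.Int.mod (pvCnt ki) bs = 0 := by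
            intro ki hki
            rw [hks] at hki
            obtain ⟨ki', hki', rfl⟩ := List.mem_map.mp hki
            exact hall ki' hki'
          rw [pv_foldl_id bs s.toList ks hb (by omega) hall']
          have hdvd : bs ∣ (ks.map pvCnt).sum := by
            apply List.dvd_sum
            intro a ha
            obtain ⟨ki, hki, rfl⟩ := List.mem_map.mp ha
            exact (PySem.Int.mod_eq_zero_iff_dvd _ _).mp (hall' ki hki)
          show s.toList = pvS bs ((List.map pvCnt ks).sum) s.toList
          rw [pv_pvS_id bs _ s.toList hb (by omega)
            ((PySem.Int.mod_eq_zero_iff_dvd _ _).mpr hdvd)]
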